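-- pv_equiv track=rewrite | github.com/afalenfiuba/TP1-TDA | src/greedy.py | suma_ordenada_por_tiempo
-- ===== SOURCE A (Python) =====
-- def suma_ordenada_por_tiempo(batallas):
--     ordenados = sorted(batallas, key=lambda x: x[0])
--
--     suma_total = 0
--     suma_tiempos = 0
--     for t_i, p_i in ordenados:
--         suma_tiempos = t_i + suma_tiempos
--         suma_total = (p_i * suma_tiempos) + suma_total
--
--     return suma_total
-- ===== SOURCE B (Python) =====
-- def suma_ordenada_por_tiempo(batallas):
--     # No sorting: sum each pair's contribution directly.
--     # total = sum_i t_i*p_i + sum over pairs (i earlier than j in the stable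
--     # order by time) of t_i * p_j; for original indices i < j, i comes earlier
--     # iff t_i <= t_j (stability), else j comes earlier and contributes t_j * p_i.
--     total = 0
--     for i, (t_i, p_i) in enumerate(batallas):
--         total += t_i * p_i
--         for t_j, p_j in batallas[i + 1:]:
--             if t_i <= t_j:
--                 total += t_i * p_j
--             else:
--                 total += t_j * p_i
--     return total
-- ===== Notes on version B (the rewrite author's own statement) =====
-- stated objective: alternative
-- what changed: B removes the sort entirely: it sums every pair's contribution directly in a quadratic double loop, charging min-time times the later element's power (stable-order tie rule t_i <= t_j for i < j), instead of A's sort followed by a prefix-sum pass.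
import Mathlib
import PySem

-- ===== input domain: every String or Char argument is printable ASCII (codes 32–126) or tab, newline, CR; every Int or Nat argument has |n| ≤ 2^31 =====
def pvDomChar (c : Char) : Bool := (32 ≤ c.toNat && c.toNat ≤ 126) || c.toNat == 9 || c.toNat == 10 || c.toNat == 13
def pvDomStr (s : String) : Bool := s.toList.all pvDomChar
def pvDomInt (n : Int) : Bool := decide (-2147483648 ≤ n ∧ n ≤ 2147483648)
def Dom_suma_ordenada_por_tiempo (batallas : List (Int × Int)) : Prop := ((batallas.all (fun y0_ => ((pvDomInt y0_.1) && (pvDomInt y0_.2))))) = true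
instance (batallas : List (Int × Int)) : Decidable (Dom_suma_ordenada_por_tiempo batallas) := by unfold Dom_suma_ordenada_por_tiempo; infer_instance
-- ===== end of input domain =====

-- B drops the sort entirely and sums each pair's contribution in a quadratic
-- double loop (alternative decomposition; exact same integer result).

-- ===== PORT A =====
def suma_ordenada_por_tiempo (batallas : List (Int × Int)) : Int :=
  let ordenados := PySem.List.sorted batallas (fun x => x.1)
  -- state = (suma_tiempos, suma_total), updated exactly as A's loop body
  let res := ordenados.foldl
    (fun (acc : Int × Int) (tp : Int × Int) =>
      (tp.1 + acc.1, tp.2 * (tp.1 + acc.1) + acc.2)) (0, 0)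
  res.2

-- ===== PORT B =====
-- inner loop of Source B: 'for t_j, p_j in batallas[i+1:]: …' over the suffix
def pvInnerB (x : Int × Int) (rest : List (Int × Int)) (total : Int) : Int :=
  rest.foldl (fun tot y => tot + (if x.1 ≤ y.1 then x.1 * y.2 else y.1 * x.2)) total

-- outer loop of Source B: each element with the suffix after it
def pvOuterB : List (Int × Int) → Int → Int
  | [], total => total
  | x :: xs, total => pvOuterB xs (pvInnerB x xs (total + x.1 * x.2))

def suma_ordenada_por_tiempo_alt (batallas : List (Int × Int)) : Int :=
  pvOuterB batallas 0

-- ===== PRECONDITION & SPEC =====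
def Spec_suma_ordenada_por_tiempo (batallas : List (Int × Int)) (out : Int) : Prop := out = suma_ordenada_por_tiempo_alt batallas
instance (batallas : List (Int × Int)) (out : Int) : Decidable (Spec_suma_ordenada_por_tiempo batallas out) := by unfold Spec_suma_ordenada_por_tiempo; infer_instance

-- ===== CLAIM (what is proved, stated in full; the proofs are below) =====
def Claim_equal_suma_ordenada_por_tiempo : Prop := ∀ (batallas : List (Int × Int)), Dom_suma_ordenada_por_tiempo batallas → Spec_suma_ordenada_por_tiempo batallas (suma_ordenada_por_tiempo batallas)

-- ===== LEMMAS AND PROOFS =====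

-- sum of second components (powers)
def pvPsum : List (Int × Int) → Int
  | [] => 0
  | (_, p) :: xs => p + pvPsum xs

-- pair contribution of B when x comes (weakly) earlier than y
def pvC (x y : Int × Int) : Int := if x.1 ≤ y.1 then x.1 * y.2 else y.1 * x.2

-- Σ_{y ∈ l} pvC x l  (x earlier than every element of l)
def pvSB (x : Int × Int) : List (Int × Int) → Int
  | [] => 0
  | y :: ys => pvC x y + pvSB x ys

-- Σ_{y ∈ l} pvC y z  (every element of l earlier than z)
def pvTB (z : Int × Int) : List (Int × Int) → Int
  | [] => 0
  | y :: ys => pvC y z + pvTB z ys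

-- closed form of B's loops
def pvBval : List (Int × Int) → Int
  | [] => 0
  | x :: xs => x.1 * x.2 + pvSB x xs + pvBval xs

-- closed form of A's loop on the list it actually traverses
def pvFval : List (Int × Int) → Int
  | [] => 0
  | (t, p) :: xs => t * p + t * pvPsum xs + pvFval xs

-- cross terms: Σ_{z ∈ l} pvTB z acc
def pvDval (acc : List (Int × Int)) : List (Int × Int) → Int
  | [] => 0
  | z :: zs => pvTB z acc + pvDval acc zs

-- the insertion step of PySem's stable insertion sort, with A's key
def pvIns (z : Int × Int) (acc : List (Int × Int)) : List (Int × Int) :=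
  PySem.List.insertBy (fun a b => decide (a.1 < b.1)) z acc

theorem pvFoldA_char (l : List (Int × Int)) (st tot : Int) :
    (l.foldl (fun (acc : Int × Int) (tp : Int × Int) =>
      (tp.1 + acc.1, tp.2 * (tp.1 + acc.1) + acc.2)) (st, tot)).2
    = tot + st * pvPsum l + pvFval l := by
  induction l generalizing st tot with
  | nil => simp [pvPsum, pvFval]
  | cons hd tl ih =>
    obtain ⟨t, p⟩ := hd
    simp only [List.foldl_cons, ih, pvPsum, pvFval]
    ring

theorem pvInnerB_char (x : Int × Int) (rest : List (Int × Int)) (total : Int) :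
    pvInnerB x rest total = total + pvSB x rest := by
  induction rest generalizing total with
  | nil => simp [pvInnerB, pvSB]
  | cons y ys ih =>
    simp only [pvInnerB, List.foldl_cons] at *
    rw [ih, pvSB, pvC]; ring

theorem pvOuterB_char (l : List (Int × Int)) (total : Int) :
    pvOuterB l total = total + pvBval l := by
  induction l generalizing total with
  | nil => simp [pvOuterB, pvBval]
  | cons x xs ih =>
    rw [pvOuterB, ih, pvInnerB_char, pvBval]; ring

theorem pvIns_cons_lt (z y : Int × Int) (ys : List (Int × Int)) (h : z.1 < y.1) :
    pvIns z (y :: ys) = z :: y :: ys := by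
  simp [pvIns, PySem.List.insertBy, h]

theorem pvIns_cons_ge (z y : Int × Int) (ys : List (Int × Int)) (h : ¬ z.1 < y.1) :
    pvIns z (y :: ys) = y :: pvIns z ys := by
  simp [pvIns, PySem.List.insertBy, h]

theorem pvPsum_pvIns (z : Int × Int) (acc : List (Int × Int)) :
    pvPsum (pvIns z acc) = z.2 + pvPsum acc := by
  induction acc with
  | nil => obtain ⟨t, p⟩ := z; simp [pvIns, PySem.List.insertBy, pvPsum]
  | cons y ys ih =>
    obtain ⟨ty, py⟩ := y
    by_cases h : z.1 < ty
    · rw [pvIns_cons_lt z (ty, py) ys h]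
      obtain ⟨t, p⟩ := z
      simp [pvPsum]
    · rw [pvIns_cons_ge z (ty, py) ys h]
      simp only [pvPsum, ih]; ring

theorem pvTB_pvIns (w z : Int × Int) (acc : List (Int × Int)) :
    pvTB w (pvIns z acc) = pvC z w + pvTB w acc := by
  induction acc with
  | nil => simp [pvIns, PySem.List.insertBy, pvTB]
  | cons y ys ih =>
    by_cases h : z.1 < y.1
    · rw [pvIns_cons_lt z y ys h]; simp only [pvTB]
    · rw [pvIns_cons_ge z y ys h]; simp only [pvTB, ih]; ring

theorem pvDval_pvIns (z : Int × Int) (acc zs : List (Int × Int)) :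
    pvDval (pvIns z acc) zs = pvSB z zs + pvDval acc zs := by
  induction zs with
  | nil => simp [pvDval, pvSB]
  | cons w ws ih =>
    simp only [pvDval, pvSB, ih, pvTB_pvIns]
    -- pvC z w appears in both pvTB over the inserted list and pvSB
    ring

theorem pvDval_nil (l : List (Int × Int)) : pvDval [] l = 0 := by
  induction l with
  | nil => rfl
  | cons z zs ih => simp [pvDval, pvTB, ih]

theorem pvTB_of_lt (z : Int × Int) (m : List (Int × Int))
    (h : ∀ w ∈ m, z.1 < w.1) : pvTB z m = z.1 * pvPsum m := by
  induction m with
  | nil => simp [pvTB, pvPsum]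
  | cons w ws ih =>
    obtain ⟨tw, pw⟩ := w
    have hw : z.1 < tw := h _ (List.mem_cons_self ..)
    simp only [pvTB, pvPsum, pvC, ih (fun u hu => h u (List.mem_cons_of_mem _ hu))]
    rw [if_neg (by omega)]
    ring

theorem pvIns_pairwise (z : Int × Int) (acc : List (Int × Int))
    (h : acc.Pairwise (fun a b => a.1 ≤ b.1)) :
    (pvIns z acc).Pairwise (fun a b => a.1 ≤ b.1) := by
  induction acc with
  | nil => simp [pvIns, PySem.List.insertBy]
  | cons y ys ih =>
    rcases List.pairwise_cons.mp h with ⟨hy, hys⟩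
    by_cases hz : z.1 < y.1
    · rw [pvIns_cons_lt z y ys hz]
      refine List.pairwise_cons.mpr ⟨?_, h⟩
      intro w hw
      rcases List.mem_cons.mp hw with rfl | hw
      · omega
      · exact le_of_lt (lt_of_lt_of_le hz (hy _ hw))
    · rw [pvIns_cons_ge z y ys hz]
      refine List.pairwise_cons.mpr ⟨?_, ih hys⟩
      intro w hw
      rcases (PySem.List.mem_insertBy _ _ _ _).mp hw with rfl | hw
      · omega
      · exact hy _ hw

theorem pvFval_pvIns (z : Int × Int) (acc : List (Int × Int))
    (h : acc.Pairwise (fun a b => a.1 ≤ b.1)) :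
    pvFval (pvIns z acc) = pvFval acc + z.1 * z.2 + pvTB z acc := by
  induction acc with
  | nil =>
    obtain ⟨t, p⟩ := z
    simp [pvIns, PySem.List.insertBy, pvFval, pvPsum, pvTB]
  | cons y ys ih =>
    rcases List.pairwise_cons.mp h with ⟨hy, hys⟩
    by_cases hz : z.1 < y.1
    · rw [pvIns_cons_lt z y ys hz]
      have hTB : pvTB z (y :: ys) = z.1 * pvPsum (y :: ys) := by
        apply pvTB_of_lt
        intro w hw
        rcases List.mem_cons.mp hw with rfl | hw
        · exact hz
        · exact lt_of_lt_of_le hz (hy _ hw)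
      obtain ⟨tz, pz⟩ := z
      obtain ⟨ty, py⟩ := y
      simp only [pvFval, hTB, pvPsum]
      ring
    · rw [pvIns_cons_ge z y ys hz]
      obtain ⟨tz, pz⟩ := z
      obtain ⟨ty, py⟩ := y
      simp only [pvFval, pvTB, pvC, ih hys, pvPsum_pvIns]
      rw [if_pos (by simp at hz; omega : ty ≤ tz)]
      ring

theorem pvFold_pvIns_char (l acc : List (Int × Int))
    (h : acc.Pairwise (fun a b => a.1 ≤ b.1)) :
    pvFval (l.foldl (fun a x => pvIns x a) acc)
      = pvFval acc + pvDval acc l + pvBval l := by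
  induction l generalizing acc with
  | nil => simp [pvDval, pvBval]
  | cons z zs ih =>
    simp only [List.foldl_cons]
    rw [ih (pvIns z acc) (pvIns_pairwise z acc h), pvFval_pvIns z acc h,
        pvDval_pvIns, pvDval, pvBval]
    ring

-- ===== VERDICT (by name: the statement is the Claim_ definition above) =====
theorem suma_ordenada_por_tiempo_spec : Claim_equal_suma_ordenada_por_tiempo := by
  intro batallas _
  unfold Spec_suma_ordenada_por_tiempo suma_ordenada_por_tiempo suma_ordenada_por_tiempo_alt
  rw [pvOuterB_char]
  simp only [pvFoldA_char, PySem.List.sorted_eq_foldl_insertBy]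
  have := pvFold_pvIns_char batallas [] List.Pairwise.nil
  simp only [pvIns] at this
  rw [this, pvDval_nil, pvFval]
  ring
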